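-- pv_equiv track=rewrite | github.com/Jahnosch/GenePS | One_to_one_parser.py | split_species_into_paralogs_and_singles
-- ===== SOURCE A (Python) =====
-- from collections import Counter
--
-- def split_species_into_paralogs_and_singles(protein_to_species_dict):
--     in_paralog_species, single_species_proteins = [], []
--     species_count = Counter(protein_to_species_dict.values())
--     for protein, species in protein_to_species_dict.items():
--         if species_count[species] > 1:
--             in_paralog_species.append(species)
--         else:
--             single_species_proteins.append(protein)
--     return set(in_paralog_species), set(single_species_proteins)
-- ===== SOURCE B (Python) =====
-- def split_species_into_paralogs_and_singles(protein_to_species_dict):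
--     # Partition-peeling: repeatedly take the first remaining entry, split off all
--     # other entries sharing its species, classify, and continue on the remainder.
--     entries = list(protein_to_species_dict.items())
--     in_paralog_species, single_species_proteins = set(), set()
--     while entries:
--         protein, species = entries[0]
--         rest = entries[1:]
--         same = [e for e in rest if e[1] == species]
--         if same:
--             in_paralog_species.add(species)
--         else:
--             single_species_proteins.add(protein)
--         entries = [e for e in rest if e[1] != species]
--     return in_paralog_species, single_species_proteins
-- ===== Notes on version B (the rewrite author's own statement) =====
-- stated objective: alternative
-- what changed: B uses no counting structure at all: it repeatedly peels the first remaining entry off a shrinking work list, partitions the remainder by that entry's species, classifies the species group on the spot, and recurses on the rest, instead of A's Counter over all values followed by a per-protein loop with count lookups.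
import Mathlib
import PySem

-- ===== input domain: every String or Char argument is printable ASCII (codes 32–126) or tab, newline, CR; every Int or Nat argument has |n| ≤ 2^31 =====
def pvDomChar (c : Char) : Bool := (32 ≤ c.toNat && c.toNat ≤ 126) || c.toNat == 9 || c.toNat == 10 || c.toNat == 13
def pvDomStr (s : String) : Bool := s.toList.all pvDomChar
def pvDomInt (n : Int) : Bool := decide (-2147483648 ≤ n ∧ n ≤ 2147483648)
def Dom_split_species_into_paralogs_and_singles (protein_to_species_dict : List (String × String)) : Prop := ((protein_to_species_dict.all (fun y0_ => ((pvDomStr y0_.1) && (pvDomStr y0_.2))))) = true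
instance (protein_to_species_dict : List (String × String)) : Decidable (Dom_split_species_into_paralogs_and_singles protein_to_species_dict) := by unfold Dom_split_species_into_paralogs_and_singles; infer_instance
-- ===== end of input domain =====

-- B replaces A's Counter-over-values + per-protein loop with a partition-peeling work-list
-- algorithm that uses no auxiliary counting structure (objective: alternative, not faster).

-- ===== PORT A =====
-- A: count species occurrences with Counter(values), then loop over every (protein, species)
-- item, appending species (count > 1) or protein (count == 1); finally set() both lists.
def split_species_into_paralogs_and_singles (protein_to_species_dict : List (String × String)) : List String × List String :=
  let species_count : PySem.Dict String Int :=
    PySem.Dict.counter (protein_to_species_dict.map (fun p => p.2))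
  let acc : List String × List String :=
    protein_to_species_dict.foldl
      (fun (acc : List String × List String) p =>
        if species_count.getD p.2 0 > 1 then (acc.1 ++ [p.2], acc.2)
        else (acc.1, acc.2 ++ [p.1]))
      ([], [])
  (PySem.Set.ofList acc.1, PySem.Set.ofList acc.2)

-- ===== PORT B =====
-- B: while the work list is nonempty, take its first entry, split the remainder into entries
-- of the same species and the rest; a nonempty same-species group marks a paralog species,
-- otherwise the lone protein is a single; continue on the rest.  (Python while-loop with two
-- mutated sets → structural recursion on the shrinking work list with two Set accumulators.)
def pvPeel (entries : List (String × String))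
    (in_paralog_species single_species_proteins : PySem.Set String) :
    PySem.Set String × PySem.Set String :=
  match entries with
  | [] => (in_paralog_species, single_species_proteins)
  | e :: rest =>
    if (rest.filter (fun x => x.2 == e.2)).isEmpty then
      pvPeel (rest.filter (fun x => !(x.2 == e.2))) in_paralog_species
        (PySem.Set.add single_species_proteins e.1)
    else
      pvPeel (rest.filter (fun x => !(x.2 == e.2)))
        (PySem.Set.add in_paralog_species e.2) single_species_proteins
termination_by entries.length
decreasing_by
  all_goals
    simp only [List.unattach, List.length_map]
    exact Nat.lt_succ_of_le (le_trans (List.length_filter_le _ _) (by simp))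

def split_species_into_paralogs_and_singles_alt (protein_to_species_dict : List (String × String)) : List String × List String :=
  pvPeel protein_to_species_dict PySem.Set.empty PySem.Set.empty

-- ===== PRECONDITION & SPEC =====
def Spec_split_species_into_paralogs_and_singles (protein_to_species_dict : List (String × String)) (out : List String × List String) : Prop := out = split_species_into_paralogs_and_singles_alt protein_to_species_dict
instance (protein_to_species_dict : List (String × String)) (out : List String × List String) : Decidable (Spec_split_species_into_paralogs_and_singles protein_to_species_dict out) := by unfold Spec_split_species_into_paralogs_and_singles; infer_instance

-- ===== CLAIM (what is proved, stated in full; the proofs are below) =====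
def Claim_equal_split_species_into_paralogs_and_singles : Prop := ∀ (protein_to_species_dict : List (String × String)), Dom_split_species_into_paralogs_and_singles protein_to_species_dict → Spec_split_species_into_paralogs_and_singles protein_to_species_dict (split_species_into_paralogs_and_singles protein_to_species_dict)

-- ===== LEMMAS AND PROOFS =====

-- A species is "paralog" iff it occurs more than once among the dict values.
def speciesParalog (l : List (String × String)) (s : String) : Bool :=
  decide (1 < List.count s (l.map Prod.snd))

-- A's per-entry appends, as two filters over the input list.
def paraList (l : List (String × String)) : List String :=
  (l.map Prod.snd).filter (speciesParalog l)
def singleList (l : List (String × String)) : List String :=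
  (l.filter (fun p => !speciesParalog l p.2)).map Prod.fst

-- A's loop: a pair fold that appends to one of two lists, split into two filters.
theorem foldl_split_append (P : String × String → Prop) [DecidablePred P] :
    ∀ (l : List (String × String)) (a b : List String),
      l.foldl (fun (acc : List String × List String) p =>
          if P p then (acc.1 ++ [p.2], acc.2) else (acc.1, acc.2 ++ [p.1])) (a, b)
      = (a ++ (l.filter (fun p => decide (P p))).map Prod.snd,
         b ++ (l.filter (fun p => !decide (P p))).map Prod.fst) := by
  intro l
  induction l with
  | nil => intro a b; simp
  | cons p t ih =>
    intro a b
    by_cases h : P p <;> simp [h, ih, List.append_assoc]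

-- A's result, characterised by filters over the input list.
theorem A_char (l : List (String × String)) :
    split_species_into_paralogs_and_singles l
      = (PySem.Set.ofList (paraList l), PySem.Set.ofList (singleList l)) := by
  simp only [split_species_into_paralogs_and_singles]
  rw [foldl_split_append (fun p : String × String =>
      (PySem.Dict.counter (l.map (fun p => p.2))).getD p.2 0 > 1) l [] []]
  have hpt : ∀ p : String × String,
      decide ((PySem.Dict.counter (l.map (fun p => p.2))).getD p.2 0 > 1)
        = speciesParalog l p.2 := by
    intro p
    rw [show (l.map (fun p => p.2)) = l.map Prod.snd from rfl, PySem.Dict.getD_counter]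
    show decide (1 < (List.count p.2 (l.map Prod.snd) : Int))
        = decide (1 < List.count p.2 (l.map Prod.snd))
    exact decide_eq_decide.mpr Nat.one_lt_cast
  have h1 : (l.filter (fun p =>
        decide ((PySem.Dict.counter (l.map (fun p => p.2))).getD p.2 0 > 1))).map Prod.snd
      = paraList l := by
    unfold paraList
    rw [List.filter_map]
    exact congrArg (List.map Prod.snd) (List.filter_congr (fun p _ => hpt p))
  have h2 : (l.filter (fun p =>
        !decide ((PySem.Dict.counter (l.map (fun p => p.2))).getD p.2 0 > 1))).map Prod.fst
      = singleList l := by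
    unfold singleList
    exact congrArg (List.map Prod.fst)
      (List.filter_congr (fun p _ => congrArg Bool.not (hpt p)))
  exact congrArg₂ Prod.mk (congrArg PySem.Set.ofList h1) (congrArg PySem.Set.ofList h2)

-- Removing every entry of one species does not change any other species' count.
theorem count_remove_species (rest : List (String × String)) (x s : String) (hne : s ≠ x) :
    List.count s ((rest.filter (fun p => !(p.2 == x))).map Prod.snd)
      = List.count s (rest.map Prod.snd) := by
  induction rest with
  | nil => rfl
  | cons p t ih =>
    by_cases h : p.2 = x
    · rw [List.filter_cons_of_neg (by simp [h]), ih, List.map_cons, List.count_cons]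
      have : ¬(p.2 = s) := by rw [h]; exact fun hx => hne hx.symm
      simp [this]
    · rw [List.filter_cons_of_pos (by simp [h]), List.map_cons, List.map_cons,
        List.count_cons, List.count_cons, ih]

-- Mapping the species out commutes with dropping one species.
theorem map_snd_filter (rest : List (String × String)) (x : String) :
    (rest.filter (fun p => !(p.2 == x))).map Prod.snd
      = (rest.map Prod.snd).filter (fun y => !(y == x)) := by
  induction rest with
  | nil => rfl
  | cons p t ih =>
    by_cases h : p.2 = x
    · rw [List.filter_cons_of_neg (by simp [h]), List.map_cons,
        List.filter_cons_of_neg (by simp [h]), ih]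
    · rw [List.filter_cons_of_pos (by simp [h]), List.map_cons, List.map_cons,
        List.filter_cons_of_pos (by simp [h]), ih]

-- After the peel step, "paralog" is unchanged for the surviving species.
theorem paralog_peel (e : String × String) (rest : List (String × String))
    (s : String) (hne : s ≠ e.2) :
    speciesParalog (rest.filter (fun p => !(p.2 == e.2))) s
      = speciesParalog (e :: rest) s := by
  unfold speciesParalog
  rw [count_remove_species rest e.2 s hne, List.map_cons, List.count_cons]
  have : ¬(e.2 = s) := fun hx => hne hx.symm
  simp [this]

-- Adding an element already in the set leaves a subsequent fold unchanged when the
-- dropped occurrences are exactly that element.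
theorem foldl_add_filter_ne (x : String) :
    ∀ (ys : List String) (S : PySem.Set String), x ∈ S →
      (ys.filter (fun y => !(y == x))).foldl PySem.Set.add S = ys.foldl PySem.Set.add S := by
  intro ys
  induction ys with
  | nil => intro S _; rfl
  | cons y t ih =>
    intro S hx
    by_cases h : y = x
    · rw [List.filter_cons_of_neg (by simp [h]), List.foldl_cons, h,
        PySem.Set.add_of_mem hx, ih S hx]
    · rw [List.filter_cons_of_pos (by simp [h]), List.foldl_cons, List.foldl_cons]
      exact ih _ ((PySem.Set.mem_add _ _ _).mpr (Or.inl hx))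

-- The same-species group of the head is empty iff the head's species never recurs.
theorem isEmpty_same (e : String × String) (rest : List (String × String)) :
    (rest.filter (fun x => x.2 == e.2)).isEmpty
      = !speciesParalog (e :: rest) e.2 := by
  unfold speciesParalog
  rw [List.map_cons, List.count_cons_self]
  have hlen : (rest.filter (fun x => x.2 == e.2)).length
      = List.count e.2 (rest.map Prod.snd) := by
    rw [← List.countP_eq_length_filter, List.count_eq_countP, List.countP_map]
    rfl
  by_cases h : List.count e.2 (rest.map Prod.snd) = 0
  · have hnil : rest.filter (fun x => x.2 == e.2) = [] :=
      List.length_eq_zero_iff.mp (by rw [hlen, h])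
    rw [hnil, h]
    simp
  · have h1 : (rest.filter (fun x => x.2 == e.2)).isEmpty = false := by
      rw [← Bool.not_eq_true, List.isEmpty_iff_length_eq_zero, hlen]
      exact h
    have h2 : 1 < List.count e.2 (rest.map Prod.snd) + 1 := by omega
    rw [h1]
    simp [h2]

-- The peel loop computes A's two filtered lists, folded into the accumulators.
theorem pvPeel_char :
    ∀ (n : ℕ) (l : List (String × String)), l.length ≤ n →
    ∀ (P S : PySem.Set String),
      pvPeel l P S = ((paraList l).foldl PySem.Set.add P, (singleList l).foldl PySem.Set.add S) := by
  intro n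
  induction n with
  | zero =>
    intro l hl P S
    have : l = [] := List.length_eq_zero_iff.mp (Nat.le_zero.mp hl)
    subst this
    simp [pvPeel, paraList, singleList]
  | succ n ih =>
    intro l hl P S
    match l with
    | [] => simp [pvPeel, paraList, singleList]
    | e :: rest =>
      have hrec : (rest.filter (fun x => !(x.2 == e.2))).length ≤ n :=
        le_trans (List.length_filter_le _ _) (Nat.le_of_succ_le_succ hl)
      -- surviving entries have species ≠ e.2, so paralog status is preserved
      have hp : ∀ s ∈ (rest.filter (fun x => !(x.2 == e.2))).map Prod.snd,
          speciesParalog (rest.filter (fun x => !(x.2 == e.2))) s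
            = speciesParalog (e :: rest) s := by
        intro s hs
        rcases List.mem_map.mp hs with ⟨p, hpmem, hps⟩
        have h2 : ¬(p.2 == e.2) = true := by
          have := (List.mem_filter.mp hpmem).2
          simpa using this
        exact paralog_peel e rest s (by subst hps; simpa using h2)
      have hpara' : paraList (rest.filter (fun x => !(x.2 == e.2)))
          = ((rest.map Prod.snd).filter (fun y => !(y == e.2))).filter
              (speciesParalog (e :: rest)) := by
        unfold paraList
        rw [List.filter_congr hp, map_snd_filter]
      have hsingle' : singleList (rest.filter (fun x => !(x.2 == e.2)))
          = ((rest.filter (fun x => !(x.2 == e.2))).filter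
              (fun p => !speciesParalog (e :: rest) p.2)).map Prod.fst := by
        unfold singleList
        refine congrArg (List.map Prod.fst) (List.filter_congr ?_)
        intro p hpmem
        have h2 : ¬(p.2 == e.2) = true := by
          have := (List.mem_filter.mp hpmem).2; simpa using this
        rw [paralog_peel e rest p.2 (by simpa using h2)]
      simp only [pvPeel]
      rw [isEmpty_same e rest]
      by_cases hpar : speciesParalog (e :: rest) e.2 = true
      · -- paralog head: add e.2, peel its whole group away
        rw [hpar]
        simp only [Bool.not_true, Bool.false_eq_true, if_false]
        rw [ih _ hrec, hpara', hsingle']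
        refine congrArg₂ Prod.mk ?_ ?_
        · have hxmem : e.2 ∈ PySem.Set.add P e.2 := (PySem.Set.mem_add _ _ _).mpr (Or.inr rfl)
          rw [List.filter_comm, foldl_add_filter_ne e.2 _ _ hxmem]
          unfold paraList
          rw [List.map_cons, List.filter_cons_of_pos hpar, List.foldl_cons]
        · unfold singleList
          rw [List.filter_cons_of_neg (by simp [hpar]), List.filter_filter]
          refine congrArg (List.foldl PySem.Set.add S)
            (congrArg (List.map Prod.fst) (List.filter_congr ?_))
          intro p _
          by_cases h : p.2 = e.2
          · simp [h, hpar]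
          · simp [h]
      · -- unique head: e.1 is a single; its species does not recur, the filter is the identity
        have hpar' : speciesParalog (e :: rest) e.2 = false := by simpa using hpar
        rw [hpar']
        simp only [Bool.not_false, if_true]
        rw [ih _ hrec, hpara', hsingle']
        have hnorec : List.count e.2 (rest.map Prod.snd) = 0 := by
          unfold speciesParalog at hpar'
          rw [List.map_cons, List.count_cons_self] at hpar'
          simp only [decide_eq_false_iff_not, not_lt] at hpar'
          omega
        have hid : rest.filter (fun x => !(x.2 == e.2)) = rest := by
          refine List.filter_eq_self.mpr ?_
          intro p hpmem
          have hmem : p.2 ∈ rest.map Prod.snd := List.mem_map.mpr ⟨p, hpmem, rfl⟩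
          have hne : p.2 ≠ e.2 := by
            intro h
            rw [h] at hmem
            exact absurd (List.count_pos_iff.mpr hmem) (by omega)
          simpa using hne
        rw [hid]
        refine congrArg₂ Prod.mk ?_ ?_
        · have hfe : (rest.map Prod.snd).filter (fun y => !(y == e.2)) = rest.map Prod.snd := by
            refine List.filter_eq_self.mpr ?_
            intro y hy
            have hne : y ≠ e.2 := fun h => absurd (List.count_pos_iff.mpr (h ▸ hy)) (by omega)
            simpa using hne
          rw [hfe]
          unfold paraList
          rw [List.map_cons, List.filter_cons_of_neg (by simp [hpar'])]
        · unfold singleList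
          rw [List.filter_cons_of_pos (by simp [hpar']), List.map_cons, List.foldl_cons]

-- ===== VERDICT (by name: the statement is the Claim_ definition above) =====
theorem split_species_into_paralogs_and_singles_spec : Claim_equal_split_species_into_paralogs_and_singles := by
  intro l _
  unfold Spec_split_species_into_paralogs_and_singles split_species_into_paralogs_and_singles_alt
  rw [A_char, pvPeel_char l.length l le_rfl]
  exact congrArg₂ Prod.mk (PySem.Set.ofList_eq_foldl _) (PySem.Set.ofList_eq_foldl _)
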